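-- pv_equiv track=rewrite | github.com/bdschi1/excel-model-eval | src/llm_analyzer.py | create_findings_prompt
-- ===== SOURCE A (Python) =====
-- def create_findings_prompt(issues: list, model_name: str, complexity_score: int) -> str:
--     """Format audit findings into a prompt for the LLM."""
--
--     # Group issues by severity
--     critical = [i for i in issues if i.get('severity', '').lower() == 'critical']
--     high = [i for i in issues if i.get('severity', '').lower() == 'high']
--     medium = [i for i in issues if i.get('severity', '').lower() == 'medium']
--
--     prompt = f"""Analyze the following audit findings for the financial model: {model_name}
-- Model Complexity Score: {complexity_score}/5
--
-- ## Audit Findings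
--
-- ### Critical Issues ({len(critical)})
-- """
--     for i in critical:
--         prompt += f"- **{i['type']}** at `{i['location']}`: {i['detail']}\n"
--
--     prompt += f"\n### High Severity ({len(high)})\n"
--     for i in high:
--         prompt += f"- **{i['type']}** at `{i['location']}`: {i['detail']}\n"
--
--     prompt += f"\n### Medium Severity ({len(medium)})\n"
--     for i in medium:
--         prompt += f"- **{i['type']}** at `{i['location']}`: {i['detail']}\n"
--
--     prompt += """
-- ## Your Task
-- Provide a narrative analysis of these findings suitable for a senior investment professional.
-- Focus on materiality and actionability. Be specific about locations and impacts.
-- """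
--
--     return prompt
-- ===== SOURCE B (Python) =====
-- def create_findings_prompt(issues: list, model_name: str, complexity_score: int) -> str:
--     """Format audit findings into a prompt for the LLM (single-pass grouping)."""
--     buckets = {'critical': [], 'high': [], 'medium': []}
--     for i in issues:
--         sev = i.get('severity', '').lower()
--         if sev in buckets:
--             buckets[sev].append(i)
--
--     parts = [f"""Analyze the following audit findings for the financial model: {model_name}
-- Model Complexity Score: {complexity_score}/5
--
-- ## Audit Findings
-- """]
--     for title, key in (("Critical Issues", 'critical'),
--                        ("High Severity", 'high'),
--                        ("Medium Severity", 'medium')):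
--         bucket = buckets[key]
--         parts.append(f"\n### {title} ({len(bucket)})\n")
--         for i in bucket:
--             parts.append(f"- **{i['type']}** at `{i['location']}`: {i['detail']}\n")
--     parts.append("""
-- ## Your Task
-- Provide a narrative analysis of these findings suitable for a senior investment professional.
-- Focus on materiality and actionability. Be specific about locations and impacts.
-- """)
--     return "".join(parts)
-- ===== Notes on version B (the rewrite author's own statement) =====
-- stated objective: simpler
-- what changed: Replaces A's three separate filter passes over issues by one grouping pass into three buckets, and A's three copy-pasted header+loop blocks by a single shared emission loop over (title, bucket) sections joined at the end.
import Mathlib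
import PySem

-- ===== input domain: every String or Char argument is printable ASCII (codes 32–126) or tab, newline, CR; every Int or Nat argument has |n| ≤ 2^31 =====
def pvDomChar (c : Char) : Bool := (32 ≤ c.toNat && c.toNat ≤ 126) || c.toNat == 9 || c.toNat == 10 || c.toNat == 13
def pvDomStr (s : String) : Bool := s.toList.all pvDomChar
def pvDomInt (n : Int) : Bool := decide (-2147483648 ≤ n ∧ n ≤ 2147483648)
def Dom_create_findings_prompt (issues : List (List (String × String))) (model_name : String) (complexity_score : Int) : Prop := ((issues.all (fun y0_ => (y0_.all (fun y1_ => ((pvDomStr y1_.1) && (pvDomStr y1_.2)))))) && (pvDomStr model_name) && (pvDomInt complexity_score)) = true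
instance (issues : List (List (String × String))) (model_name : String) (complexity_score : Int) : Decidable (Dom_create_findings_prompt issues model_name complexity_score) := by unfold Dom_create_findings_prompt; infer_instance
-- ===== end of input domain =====

-- B replaces A's three filter passes by one grouping pass over issues and one
-- shared section-emission loop (objective: simpler decomposition; same cost).
-- dicts are association lists; lookup is first match.

-- ===== PORT A =====
-- shared dict-lookup helpers (i.get(k,'') / i[k] with '' default, first match)
def pvLook (i : List (String × String)) (k : String) : String :=
  ((i.find? (fun p => p.1 == k)).map (·.2)).getD ""

def pvSev (i : List (String × String)) : String :=
  PySem.Str.lower (pvLook i "severity")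

def pvLine (i : List (String × String)) : String :=
  "- **" ++ pvLook i "type" ++ "** at `" ++ pvLook i "location" ++ "`: " ++ pvLook i "detail" ++ "\n"

def create_findings_prompt (issues : List (List (String × String))) (model_name : String) (complexity_score : Int) : String :=
  let critical := issues.filter (fun i => pvSev i == "critical")
  let high := issues.filter (fun i => pvSev i == "high")
  let medium := issues.filter (fun i => pvSev i == "medium")
  let prompt := "Analyze the following audit findings for the financial model: " ++ model_name ++
    "\nModel Complexity Score: " ++ PySem.Int.toStr complexity_score ++
    "/5\n\n## Audit Findings\n\n### Critical Issues (" ++ PySem.Int.toStr (critical.length : Int) ++ ")\n"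
  let prompt := critical.foldl (fun acc i => acc ++ pvLine i) prompt
  let prompt := prompt ++ "\n### High Severity (" ++ PySem.Int.toStr (high.length : Int) ++ ")\n"
  let prompt := high.foldl (fun acc i => acc ++ pvLine i) prompt
  let prompt := prompt ++ "\n### Medium Severity (" ++ PySem.Int.toStr (medium.length : Int) ++ ")\n"
  let prompt := medium.foldl (fun acc i => acc ++ pvLine i) prompt
  prompt ++ "\n## Your Task\nProvide a narrative analysis of these findings suitable for a senior investment professional.\nFocus on materiality and actionability. Be specific about locations and impacts.\n"

-- ===== PORT B =====
def create_findings_prompt_alt (issues : List (List (String × String))) (model_name : String) (complexity_score : Int) : String :=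
  -- single grouping pass: buckets = (critical, high, medium)
  let buckets := issues.foldl
    (fun (b : List (List (String × String)) × List (List (String × String)) × List (List (String × String))) i =>
      let sev := pvSev i
      if sev == "critical" then (b.1 ++ [i], b.2.1, b.2.2)
      else if sev == "high" then (b.1, b.2.1 ++ [i], b.2.2)
      else if sev == "medium" then (b.1, b.2.1, b.2.2 ++ [i])
      else b)
    ([], [], [])
  let parts : List String :=
    ["Analyze the following audit findings for the financial model: " ++ model_name ++
     "\nModel Complexity Score: " ++ PySem.Int.toStr complexity_score ++ "/5\n\n## Audit Findings\n"]
  -- shared emission loop over (title, bucket) sections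
  let parts := [("Critical Issues", buckets.1), ("High Severity", buckets.2.1), ("Medium Severity", buckets.2.2)].foldl
    (fun ps (sec : String × List (List (String × String))) =>
      let ps := ps ++ ["\n### " ++ sec.1 ++ " (" ++ PySem.Int.toStr (sec.2.length : Int) ++ ")\n"]
      sec.2.foldl (fun ps i => ps ++ [pvLine i]) ps)
    parts
  let parts := parts ++ ["\n## Your Task\nProvide a narrative analysis of these findings suitable for a senior investment professional.\nFocus on materiality and actionability. Be specific about locations and impacts.\n"]
  String.join parts

-- ===== PRECONDITION & SPEC =====
-- Pre_ excludes exactly the inputs where A raises KeyError: an issue whose severity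
-- (lower-cased, '' default) is critical/high/medium but which lacks a 'type',
-- 'location' or 'detail' key.
def Pre_create_findings_prompt (issues : List (List (String × String))) (model_name : String) (complexity_score : Int) : Prop :=
  ∀ i ∈ issues, pvSev i ∈ ["critical", "high", "medium"] →
    ((i.find? (fun p => p.1 == "type")).isSome ∧
     (i.find? (fun p => p.1 == "location")).isSome ∧
     (i.find? (fun p => p.1 == "detail")).isSome)
instance (issues : List (List (String × String))) (model_name : String) (complexity_score : Int) : Decidable (Pre_create_findings_prompt issues model_name complexity_score) := by unfold Pre_create_findings_prompt; infer_instance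

def pvWitness_create_findings_prompt : (List (List (String × String))) × String × Int :=
  ([[("severity", "High"), ("type", "t"), ("location", "A1"), ("detail", "d")], [("severity", "low")]], "m", 3)

def Spec_create_findings_prompt (issues : List (List (String × String))) (model_name : String) (complexity_score : Int) (out : String) : Prop := out = create_findings_prompt_alt issues model_name complexity_score
instance (issues : List (List (String × String))) (model_name : String) (complexity_score : Int) (out : String) : Decidable (Spec_create_findings_prompt issues model_name complexity_score out) := by unfold Spec_create_findings_prompt; infer_instance

-- ===== CLAIM (what is proved, stated in full; the proofs are below) =====
def Claim_equal_create_findings_prompt : Prop := ∀ (issues : List (List (String × String))) (model_name : String) (complexity_score : Int), Dom_create_findings_prompt issues model_name complexity_score → Pre_create_findings_prompt issues model_name complexity_score → Spec_create_findings_prompt issues model_name complexity_score (create_findings_prompt issues model_name complexity_score)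

-- ===== LEMMAS AND PROOFS =====

theorem join_snoc (ps : List String) (s : String) : String.join (ps ++ [s]) = String.join ps ++ s := by
  simp [String.join]

theorem join_line_fold (bk : List (List (String × String))) :
    ∀ ps : List String,
      String.join (bk.foldl (fun ps i => ps ++ [pvLine i]) ps) =
      bk.foldl (fun a i => a ++ pvLine i) (String.join ps) := by
  induction bk with
  | nil => intro ps; rfl
  | cons x xs ih => intro ps; simp only [List.foldl_cons, ih, join_snoc]

theorem grouping (issues : List (List (String × String))) :
    ∀ a b c : List (List (String × String)),
      issues.foldl
        (fun (b : List (List (String × String)) × List (List (String × String)) × List (List (String × String))) i =>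
          let sev := pvSev i
          if sev == "critical" then (b.1 ++ [i], b.2.1, b.2.2)
          else if sev == "high" then (b.1, b.2.1 ++ [i], b.2.2)
          else if sev == "medium" then (b.1, b.2.1, b.2.2 ++ [i])
          else b)
        (a, b, c) =
      (a ++ issues.filter (fun i => pvSev i == "critical"),
       b ++ issues.filter (fun i => pvSev i == "high"),
       c ++ issues.filter (fun i => pvSev i == "medium")) := by
  induction issues with
  | nil => intro a b c; simp
  | cons x xs ih =>
    intro a b c
    simp only [List.foldl_cons, List.filter_cons]
    by_cases h1 : (pvSev x == "critical") = true
    · have e1 : pvSev x = "critical" := by simpa using h1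
      have h2 : (pvSev x == "high") = false := by rw [e1]; decide
      have h3 : (pvSev x == "medium") = false := by rw [e1]; decide
      simp only [h1, h2, h3, Bool.false_eq_true, if_true, if_false]
      rw [ih]; simp
    · by_cases h2 : (pvSev x == "high") = true
      · have e2 : pvSev x = "high" := by simpa using h2
        have h3 : (pvSev x == "medium") = false := by rw [e2]; decide
        have h1' : (pvSev x == "critical") = false := by rw [e2]; decide
        simp only [h1', h2, h3, Bool.false_eq_true, if_true, if_false]
        rw [ih]; simp
      · by_cases h3 : (pvSev x == "medium") = true
        · have e3 : pvSev x = "medium" := by simpa using h3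
          have h1' : (pvSev x == "critical") = false := by rw [e3]; decide
          have h2' : (pvSev x == "high") = false := by rw [e3]; decide
          simp only [h1', h2', h3, Bool.false_eq_true, if_true, if_false]
          rw [ih]; simp
        · simp only [Bool.not_eq_true] at h1 h2 h3
          simp only [h1, h2, h3, Bool.false_eq_true, if_false]
          rw [ih]

-- ===== VERDICT (by name: the statement is the Claim_ definition above) =====
theorem create_findings_prompt_spec : Claim_equal_create_findings_prompt := by
  intro issues model_name complexity_score _ _
  show create_findings_prompt issues model_name complexity_score = create_findings_prompt_alt issues model_name complexity_score
  unfold create_findings_prompt create_findings_prompt_alt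
  rw [grouping]
  simp only [List.nil_append, List.foldl_cons, List.foldl_nil]
  rw [join_snoc, join_line_fold, join_snoc, join_line_fold, join_snoc, join_line_fold, join_snoc]
  simp [String.join, ← String.append_assoc]
  rw [show ∀ X : String, X ++ "/5\n\n## Audit Findings\n" ++ "\n### Critical Issues (" =
      X ++ "/5\n\n## Audit Findings\n\n### Critical Issues (" from
    fun X => by rw [String.append_assoc]; simp]
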